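-- pv_equiv track=rewrite | github.com/drizztSun/common_project | PythonLeetcode/Leetcode/685_RedundantConnectionII.py | doit_disjoint
-- ===== SOURCE A (Python) =====
-- def doit_disjoint(edges):
--     """
--     :type edges: List[List[int]]
--     :rtype: List[int]
--     """
--     rank = {}
--     parent = {}
--
--     def find(a):
--         if a not in parent:
--             parent[a] = a
--
--         while a != parent[a]:
--             parent[a] = parent[parent[a]]
--             a = parent[a]
--         return parent[a]
--
--     def union(a, b):
--         pa = find(a)
--         pb = find(b)
--
--         rank[pa] = rank.get(pa, 0)
--         rank[pb] = rank.get(pb, 0)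
--
--         if pa == pb:
--             return True
--
--         if rank[pa] > rank[pb]:
--             parent[pb] = pa
--         elif rank[pb] > rank[pa]:
--             parent[pa] = pb
--         else:
--             parent[pb] = pa
--             rank[pa] += 1
--         return False
--
--     result = [-2, -2]
--     for s, e in edges:
--         if union(s, e):
--             result = [s, e]
--
--     return result
-- ===== SOURCE B (Python) =====
-- def doit_disjoint(edges):
--     """
--     :type edges: List[List[int]]
--     :rtype: List[int]
--     """
--     # Components as an explicit label map: label[x] is the representative of x's
--     # component (a node absent from the map is its own representative).
--     # Merging rewrites every label of one class in a single pass; no trees,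
--     # ranks or find loops.
--     label = {}
--     result = [-2, -2]
--     for s, e in edges:
--         ls = label.get(s, s)
--         le = label.get(e, e)
--         label[s] = ls
--         label[e] = le
--         if ls == le:
--             result = [s, e]
--         else:
--             label = {x: (ls if l == le else l) for x, l in label.items()}
--     return result
-- ===== Notes on version B (the rewrite author's own statement) =====
-- stated objective: alternative
-- what changed: Replaces the union-find forest (parent pointers, path halving, union by rank) by a flat label map: each node maps directly to its component representative and a merge rewrites the labels of one class in a single dictionary pass, so there is no find loop and no rank bookkeeping.
import Mathlib
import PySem

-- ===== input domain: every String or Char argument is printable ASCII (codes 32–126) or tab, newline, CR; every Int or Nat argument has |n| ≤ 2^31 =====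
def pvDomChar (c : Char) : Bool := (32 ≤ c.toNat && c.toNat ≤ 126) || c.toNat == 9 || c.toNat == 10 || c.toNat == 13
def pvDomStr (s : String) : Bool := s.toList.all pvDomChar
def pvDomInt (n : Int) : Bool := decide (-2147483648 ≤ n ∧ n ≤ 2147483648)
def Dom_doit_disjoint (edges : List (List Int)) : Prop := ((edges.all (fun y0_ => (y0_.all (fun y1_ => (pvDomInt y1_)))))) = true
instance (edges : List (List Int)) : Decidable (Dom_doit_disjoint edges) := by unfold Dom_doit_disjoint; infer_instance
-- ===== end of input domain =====

-- B replaces A's union-find forest (parent pointers, path halving, union by rank) by a flat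
-- node-to-representative label map whose merges rewrite one class's labels in a single pass
-- (objective: alternative; same return value on every edge list whose rows are pairs).


-- ===== PORT A =====
-- parent.get(a, a): a node absent from `parent` behaves as its own parent.
def pvGet (p : PySem.Dict Int Int) (a : Int) : Int := p.getD a a

-- the body of A's `while a != parent[a]` loop with path halving; the fuel only makes the loop
-- total — p.size + 1 steps suffice on the forests A builds (lemma pv_findLoop_ok below).
def pvFindLoop : Nat → PySem.Dict Int Int → Int → Int × PySem.Dict Int Int
  | 0, p, a => (a, p)
  | fuel+1, p, a =>
    if pvGet p a = a then (a, p)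
    else
      let p' := p.insert a (pvGet p (pvGet p a))
      pvFindLoop fuel p' (pvGet p' a)

-- A's `find`: ensure the key exists, then run the halving loop.
def pvFind (p : PySem.Dict Int Int) (a : Int) : Int × PySem.Dict Int Int :=
  let p := if p.contains a then p else p.insert a a
  pvFindLoop (p.size + 1) p a

-- A's `union`: returns (cycle found?, parent, rank).
def pvUnion (p rank : PySem.Dict Int Int) (a b : Int) :
    Bool × PySem.Dict Int Int × PySem.Dict Int Int :=
  let fa := pvFind p a
  let pa := fa.1
  let fb := pvFind fa.2 b
  let pb := fb.1
  let p := fb.2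
  let rank := rank.insert pa (rank.getD pa 0)
  let rank := rank.insert pb (rank.getD pb 0)
  if pa = pb then (true, p, rank)
  else if rank.getD pa 0 > rank.getD pb 0 then (false, p.insert pb pa, rank)
  else if rank.getD pb 0 > rank.getD pa 0 then (false, p.insert pa pb, rank)
  else (false, p.insert pb pa, rank.insert pa (rank.getD pa 0 + 1))

-- the body of A's `for s, e in edges` loop
def pvStepA (st : PySem.Dict Int Int × PySem.Dict Int Int × List Int) (edge : List Int) :
    PySem.Dict Int Int × PySem.Dict Int Int × List Int :=
  match edge with
  | [s, e] =>
    let u := pvUnion st.1 st.2.1 s e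
    (u.2.1, u.2.2, if u.1 then [s, e] else st.2.2)
  | _ => (st.1, st.2.1, ([] : List Int))

def doit_disjoint (edges : List (List Int)) : List Int :=
  (edges.foldl pvStepA (PySem.Dict.empty, PySem.Dict.empty, [-2, -2])).2.2

-- ===== PORT B =====
-- the body of B's loop: look up both labels, record them, and on a merge rewrite the
-- labels of e's class to s's label in one pass over the map
def pvStepB (st : PySem.Dict Int Int × List Int) (edge : List Int) :
    PySem.Dict Int Int × List Int :=
  match edge with
  | [s, e] =>
    let ls := st.1.getD s s
    let le := st.1.getD e e
    let c1 := (st.1.insert s ls).insert e le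
    if ls = le then (c1, [s, e])
    else (PySem.Dict.mk (c1.items.map (fun q => (q.1, if q.2 = le then ls else q.2))), st.2)
  | _ => st

def doit_disjoint_alt (edges : List (List Int)) : List Int :=
  (edges.foldl pvStepB (PySem.Dict.empty, [-2, -2])).2

-- ===== PRECONDITION & SPEC =====
-- Pre_ excludes exactly the rows on which Python's `for s, e in edges` unpacking raises
-- ValueError: every row must have exactly two entries.
def Pre_doit_disjoint (edges : List (List Int)) : Prop := ∀ r ∈ edges, r.length = 2
instance (edges : List (List Int)) : Decidable (Pre_doit_disjoint edges) := by
  unfold Pre_doit_disjoint; infer_instance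

def pvWitness_doit_disjoint : List (List Int) := [[1, 2], [2, 3], [1, 3]]

def Spec_doit_disjoint (edges : List (List Int)) (out : List Int) : Prop := out = doit_disjoint_alt edges
instance (edges : List (List Int)) (out : List Int) : Decidable (Spec_doit_disjoint edges out) := by unfold Spec_doit_disjoint; infer_instance

-- ===== CLAIM (what is proved, stated in full; the proofs are below) =====
def Claim_equal_doit_disjoint : Prop := ∀ (edges : List (List Int)), Dom_doit_disjoint edges → Pre_doit_disjoint edges → Spec_doit_disjoint edges (doit_disjoint edges)

-- ===== LEMMAS AND PROOFS =====

def PvFix (g : Int → Int) (a : Int) : Prop := g a = a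

def PvIsRoot (g : Int → Int) (a b : Int) : Prop := (∃ n, g^[n] a = b) ∧ PvFix g b

def PvWF (g : Int → Int) : Prop := ∀ a, ∃ b, PvIsRoot g a b

def PvSame (g : Int → Int) (x y : Int) : Prop := ∃ b, PvIsRoot g x b ∧ PvIsRoot g y b

lemma pv_root_unique {g : Int → Int} {a b c : Int} (hb : PvIsRoot g a b) (hc : PvIsRoot g a c) : b = c := by
  obtain ⟨⟨m, hm⟩, hfb⟩ := hb
  obtain ⟨⟨n, hn⟩, hfc⟩ := hc
  rcases le_total m n with h | h
  · have : g^[n] a = g^[n - m] (g^[m] a) := by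
      rw [← Function.iterate_add_apply]; congr 1; omega
    rw [hm, Function.iterate_fixed hfb] at this
    rw [hn] at this; omega
  · have : g^[m] a = g^[m - n] (g^[n] a) := by
      rw [← Function.iterate_add_apply]; congr 1; omega
    rw [hn, Function.iterate_fixed hfc] at this
    rw [hm] at this; omega

lemma pv_root_of_step {g : Int → Int} {x b : Int} (h : PvIsRoot g (g x) b) : PvIsRoot g x b := by
  obtain ⟨⟨n, hn⟩, hf⟩ := h
  exact ⟨⟨n + 1, by rw [Function.iterate_succ_apply]; exact hn⟩, hf⟩

lemma pv_step_of_root {g : Int → Int} {x b : Int} (hx : g x ≠ x) (h : PvIsRoot g x b) : PvIsRoot g (g x) b := by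
  obtain ⟨⟨n, hn⟩, hf⟩ := h
  match n, hn with
  | 0, hn => simp only [Function.iterate_zero, id_eq] at hn; subst hn; exact absurd hf hx
  | n + 1, hn => exact ⟨⟨n, by rw [← Function.iterate_succ_apply]; exact hn⟩, hf⟩

lemma pv_wf_period {g : Int → Int} (wf : PvWF g) {a : Int} {j : ℕ} (hj : j ≠ 0) (h : g^[j] a = a) : g a = a := by
  have hper : ∀ k, g^[k * j] a = a := by
    intro k; induction k with
    | zero => simp
    | succ k ih => rw [Nat.succ_mul, Function.iterate_add_apply, h, ih]
  obtain ⟨b, ⟨⟨n, hn⟩, hfb⟩⟩ := wf a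
  have h1 : g^[(n + 1) * j] a = a := hper (n + 1)
  have h2 : g^[(n + 1) * j] a = b := by
    have hle : n ≤ (n + 1) * j := by
      have h1 : 1 ≤ j := Nat.one_le_iff_ne_zero.mpr hj
      calc n ≤ (n + 1) * 1 := by omega
        _ ≤ (n + 1) * j := Nat.mul_le_mul_left _ h1
    have : g^[(n + 1) * j] a = g^[(n + 1) * j - n] (g^[n] a) := by
      rw [← Function.iterate_add_apply]; congr 1; omega
    rw [hn, Function.iterate_fixed hfb] at this; exact this
  have : a = b := h1 ▸ h2
  subst this; exact hfb

lemma pv_fix_halve {g : Int → Int} (wf : PvWF g) {a : Int} (ha : g a ≠ a) (x : Int) :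
    PvFix (Function.update g a (g (g a))) x ↔ PvFix g x := by
  unfold PvFix
  by_cases hx : x = a
  · subst hx
    rw [Function.update_self]
    constructor
    · intro h2
      exact absurd (pv_wf_period wf (by norm_num : (2:ℕ) ≠ 0) (by simpa [Function.iterate_succ_apply] using h2)) ha
    · intro h; exact absurd h ha
  · rw [Function.update_of_ne hx]

lemma pv_halve_root {g : Int → Int} (wf : PvWF g) {a : Int} (ha : g a ≠ a) (x b : Int) :
    PvIsRoot (Function.update g a (g (g a))) x b ↔ PvIsRoot g x b := by
  set g' := Function.update g a (g (g a)) with hg'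
  have hga : g' a = g (g a) := Function.update_self a _ g
  have hother : ∀ y, y ≠ a → g' y = g y := fun y hy => Function.update_of_ne hy _ g
  constructor
  · rintro ⟨⟨n, hn⟩, hf⟩
    have hfb : PvFix g b := (pv_fix_halve wf ha b).mp hf
    clear hf
    induction n generalizing x with
    | zero => exact ⟨⟨0, hn⟩, hfb⟩
    | succ n ih =>
      rw [Function.iterate_succ_apply] at hn
      have hrec := ih (g' x) hn
      by_cases hx : x = a
      · subst hx; rw [hga] at hrec
        exact pv_root_of_step (pv_root_of_step hrec)
      · rw [hother x hx] at hrec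
        exact pv_root_of_step hrec
  · rintro ⟨⟨n, hn⟩, hf⟩
    have hfb : PvFix g' b := (pv_fix_halve wf ha b).mpr hf
    induction n generalizing x with
    | zero => exact ⟨⟨0, hn⟩, hfb⟩
    | succ n ih =>
      rw [Function.iterate_succ_apply] at hn
      have hrec := ih (g x) hn
      by_cases hx : x = a
      · rw [hx]; rw [hx] at hn
        by_cases hfix : g (g a) = g a
        · have hroot : PvIsRoot g (g a) (g a) := ⟨⟨0, rfl⟩, hfix⟩
          have hrootb : PvIsRoot g (g a) b := ⟨⟨n, hn⟩, hf⟩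
          have hba : b = g a := pv_root_unique hrootb hroot
          exact ⟨⟨1, by simp only [Function.iterate_one]; rw [hga, hfix, ← hba]⟩, hfb⟩
        · have hrec := ih (g a) hn
          have hgane : g a ≠ a := fun h => ha ((congrArg g h).symm ▸ h)
          have h1 : g' (g a) = g (g a) := hother (g a) hgane
          have h4 : PvIsRoot g' (g (g a)) b := by
            have hstep := pv_step_of_root (g := g') (x := g a) (b := b) (by rw [h1]; exact hfix) hrec
            rwa [h1] at hstep
          exact pv_root_of_step (by rw [hga]; exact h4)
      · have hrec := ih (g x) hn
        have h1 : g' x = g x := hother x hx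
        exact pv_root_of_step (by rw [h1]; exact hrec)

lemma pv_wf_halve {g : Int → Int} (wf : PvWF g) {a : Int} (ha : g a ≠ a) :
    PvWF (Function.update g a (g (g a))) := by
  intro x
  obtain ⟨b, hb⟩ := wf x
  exact ⟨b, (pv_halve_root wf ha x b).mpr hb⟩

lemma pv_link_root_pa {g : Int → Int} {pa pb : Int} (hpa : PvFix g pa) (hpb : PvFix g pb)
    (hne : pa ≠ pb) {x : Int} (h : PvIsRoot g x pa) :
    PvIsRoot (Function.update g pa pb) x pb := by
  set g' := Function.update g pa pb with hg'
  have hgpa : g' pa = pb := Function.update_self pa pb g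
  have hother : ∀ y, y ≠ pa → g' y = g y := fun y hy => Function.update_of_ne hy pb g
  have hfb' : PvFix g' pb := by unfold PvFix; rw [hother pb (Ne.symm hne)]; exact hpb
  have main : ∀ n x, g^[n] x = pa → PvIsRoot g' x pb := by
    intro n
    induction n with
    | zero =>
      intro x hn
      simp only [Function.iterate_zero, id_eq] at hn
      subst hn
      exact ⟨⟨1, by simp [hgpa]⟩, hfb'⟩
    | succ n ih =>
      intro x hn
      by_cases hx : x = pa
      · subst hx
        exact ⟨⟨1, by simp [hgpa]⟩, hfb'⟩
      · rw [Function.iterate_succ_apply] at hn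
        exact pv_root_of_step (by rw [hother x hx]; exact ih (g x) hn)
  obtain ⟨⟨n, hn⟩, _⟩ := h
  exact main n x hn

lemma pv_link_root_other {g : Int → Int} {pa pb : Int} (hpa : PvFix g pa)
    {x b : Int} (hbne : b ≠ pa) (h : PvIsRoot g x b) :
    PvIsRoot (Function.update g pa pb) x b := by
  set g' := Function.update g pa pb with hg'
  have hother : ∀ y, y ≠ pa → g' y = g y := fun y hy => Function.update_of_ne hy pb g
  obtain ⟨⟨n, hn⟩, hf⟩ := h
  have hfb' : PvFix g' b := by unfold PvFix; rw [hother b hbne]; exact hf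
  have main : ∀ n x, g^[n] x = b → PvIsRoot g' x b := by
    intro n
    induction n with
    | zero =>
      intro x hn
      simp only [Function.iterate_zero, id_eq] at hn
      subst hn
      exact ⟨⟨0, rfl⟩, hfb'⟩
    | succ n ih =>
      intro x hn
      by_cases hx : x = pa
      · exfalso
        have h1 : PvIsRoot g pa b := hx ▸ (⟨⟨n + 1, hn⟩, hf⟩ : PvIsRoot g x b)
        exact hbne (pv_root_unique h1 ⟨⟨0, rfl⟩, hpa⟩)
      · rw [Function.iterate_succ_apply] at hn
        exact pv_root_of_step (by rw [hother x hx]; exact ih (g x) hn)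
  exact main n x hn

lemma pv_link_root_fwd {g : Int → Int} {pa pb : Int} (hpa : PvFix g pa) (hpb : PvFix g pb)
    (hne : pa ≠ pb) {x b : Int} (h : PvIsRoot (Function.update g pa pb) x b) :
    (PvIsRoot g x pa ∧ b = pb) ∨ (PvIsRoot g x b ∧ b ≠ pa) := by
  set g' := Function.update g pa pb with hg'
  have hgpa : g' pa = pb := Function.update_self pa pb g
  have hother : ∀ y, y ≠ pa → g' y = g y := fun y hy => Function.update_of_ne hy pb g
  obtain ⟨⟨n, hn⟩, hf⟩ := h
  have hbnepa : b ≠ pa := by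
    intro hb; subst hb
    unfold PvFix at hf
    exact hne (by rw [hgpa] at hf; exact hf.symm)
  have hfb : PvFix g b := by unfold PvFix; rw [← hother b hbnepa]; exact hf
  have main : ∀ n x, g'^[n] x = b → (PvIsRoot g x pa ∧ b = pb) ∨ (PvIsRoot g x b ∧ b ≠ pa) := by
    intro n
    induction n with
    | zero =>
      intro x hn
      simp only [Function.iterate_zero, id_eq] at hn
      subst hn
      exact Or.inr ⟨⟨⟨0, rfl⟩, hfb⟩, hbnepa⟩
    | succ n ih =>
      intro x hn
      rw [Function.iterate_succ_apply] at hn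
      rcases ih (g' x) hn with ⟨hroot, hbpb⟩ | ⟨hroot, _⟩
      · by_cases hx : x = pa
        · subst hx
          rw [hgpa] at hroot
          have hroot2 : PvIsRoot g pb pb := ⟨⟨0, rfl⟩, hpb⟩
          exact absurd (pv_root_unique hroot hroot2) hne
        · rw [hother x hx] at hroot
          exact Or.inl ⟨pv_root_of_step hroot, hbpb⟩
      · by_cases hx : x = pa
        · subst hx
          rw [hgpa] at hroot
          have hroot2 : PvIsRoot g pb pb := ⟨⟨0, rfl⟩, hpb⟩
          have hbp : b = pb := pv_root_unique hroot hroot2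
          exact Or.inl ⟨⟨⟨0, rfl⟩, hpa⟩, hbp⟩
        · rw [hother x hx] at hroot
          exact Or.inr ⟨pv_root_of_step hroot, hbnepa⟩
  exact main n x hn

lemma pv_wf_link {g : Int → Int} (wf : PvWF g) {pa pb : Int} (hpa : PvFix g pa) (hpb : PvFix g pb)
    (hne : pa ≠ pb) : PvWF (Function.update g pa pb) := by
  intro x
  obtain ⟨b, hb⟩ := wf x
  by_cases hbpa : b = pa
  · exact ⟨pb, pv_link_root_pa hpa hpb hne (hbpa ▸ hb)⟩
  · exact ⟨b, pv_link_root_other hpa hbpa hb⟩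

lemma pv_link_same {g : Int → Int} {pa pb : Int} (hpa : PvFix g pa) (hpb : PvFix g pb)
    (hne : pa ≠ pb) (x y : Int) :
    PvSame (Function.update g pa pb) x y ↔
      (PvSame g x y ∨ ((PvIsRoot g x pa ∨ PvIsRoot g x pb) ∧ (PvIsRoot g y pa ∨ PvIsRoot g y pb))) := by
  constructor
  · rintro ⟨b, hx, hy⟩
    rcases pv_link_root_fwd hpa hpb hne hx with ⟨hx', hbpb⟩ | ⟨hx', hbne⟩ <;>
      rcases pv_link_root_fwd hpa hpb hne hy with ⟨hy', hbpb'⟩ | ⟨hy', hbne'⟩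
    · exact Or.inr ⟨Or.inl hx', Or.inl hy'⟩
    · exact Or.inr ⟨Or.inl hx', Or.inr (hbpb ▸ hy')⟩
    · exact Or.inr ⟨Or.inr (hbpb' ▸ hx'), Or.inl hy'⟩
    · exact Or.inl ⟨b, hx', hy'⟩
  · rintro (⟨b, hx, hy⟩ | ⟨hx, hy⟩)
    · by_cases hbpa : b = pa
      · subst hbpa
        exact ⟨pb, pv_link_root_pa hpa hpb hne hx, pv_link_root_pa hpa hpb hne hy⟩
      · exact ⟨b, pv_link_root_other hpa hbpa hx, pv_link_root_other hpa hbpa hy⟩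
    · refine ⟨pb, ?_, ?_⟩
      · rcases hx with h | h
        · exact pv_link_root_pa hpa hpb hne h
        · exact pv_link_root_other hpa hne.symm h
      · rcases hy with h | h
        · exact pv_link_root_pa hpa hpb hne h
        · exact pv_link_root_other hpa hne.symm h

lemma pv_pvGet_insert (p : PySem.Dict Int Int) (k v : Int) :
    pvGet (p.insert k v) = Function.update (pvGet p) k v := by
  funext x
  unfold pvGet
  rw [PySem.Dict.getD_insert]
  by_cases hx : x = k
  · subst hx; simp [Function.update_self]
  · simp [hx]

lemma pv_pvGet_ensure (p : PySem.Dict Int Int) (a : Int) (h : p.contains a = false) :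
    pvGet (p.insert a a) = pvGet p := by
  rw [pv_pvGet_insert]
  have h1 : pvGet p a = a := PySem.Dict.getD_of_not_contains p a h
  have h2 : Function.update (pvGet p) a a = Function.update (pvGet p) a (pvGet p a) := by rw [h1]
  rw [h2, Function.update_eq_self]

lemma pv_mem_keys_of_get_ne (p : PySem.Dict Int Int) (x : Int) (h : pvGet p x ≠ x) :
    x ∈ p.keys := by
  by_contra hmem
  have h0 : p.get? x = none := (PySem.Dict.get?_eq_none_iff_not_mem_keys p x).mpr hmem
  exact h (PySem.Dict.getD_of_get?_eq_none p x h0)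

-- the least distance to a root is bounded by the number of keys

lemma pv_depth_le (p : PySem.Dict Int Int) (a : Int) (wf : PvWF (pvGet p)) :
    ∃ n ≤ p.size, PvFix (pvGet p) ((pvGet p)^[n] a) := by
  set g := pvGet p with hg
  have hex : ∃ n, PvFix g (g^[n] a) := by
    obtain ⟨b, ⟨⟨n, hn⟩, hf⟩⟩ := wf a
    exact ⟨n, by rw [hn]; exact hf⟩
  have hdec : DecidablePred (fun n => PvFix g (g^[n] a)) := fun n => by unfold PvFix; infer_instance
  set d := Nat.find hex with hd
  refine ⟨d, ?_, Nat.find_spec hex⟩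
  -- the first d iterates are distinct non-roots, hence d distinct keys
  set L := (List.range d).map (fun i => g^[i] a) with hL
  have hnodup : L.Nodup := by
    rw [hL]
    refine List.Nodup.map_on ?_ (List.nodup_range)
    intro i hi j hj hij
    rw [List.mem_range] at hi hj
    by_contra hne
    rcases Nat.lt_or_ge i j with hlt | hge
    · have hper : g^[j - i] (g^[i] a) = g^[i] a := by
        rw [← Function.iterate_add_apply]
        have : j - i + i = j := by omega
        rw [this, hij]
      have := pv_wf_period wf (by omega : j - i ≠ 0) hper
      exact absurd (Nat.find_min hex hi this) (by simp)
    · have hlt : j < i := by omega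
      have hper : g^[i - j] (g^[j] a) = g^[j] a := by
        rw [← Function.iterate_add_apply]
        have : i - j + j = i := by omega
        rw [this, ← hij]
      have := pv_wf_period wf (by omega : i - j ≠ 0) hper
      exact absurd (Nat.find_min hex hj this) (by simp)
  have hsub : ∀ x ∈ L, x ∈ p.keys := by
    intro x hx
    rw [hL] at hx
    obtain ⟨i, hi, hxi⟩ := List.mem_map.mp hx
    rw [List.mem_range] at hi
    have hnf : ¬ PvFix g (g^[i] a) := Nat.find_min hex hi
    exact pv_mem_keys_of_get_ne p x (by rw [← hxi]; exact hnf)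
  have hlen : L.length = d := by rw [hL]; simp
  have hcard : L.length ≤ p.keys.length := by
    calc L.length = L.toFinset.card := (List.toFinset_card_of_nodup hnodup).symm
      _ ≤ p.keys.toFinset.card := Finset.card_le_card (fun x hx => List.mem_toFinset.mpr (hsub x (List.mem_toFinset.mp hx)))
      _ ≤ p.keys.length := p.keys.toFinset_card_le
  have hsz : p.keys.length = p.size := by
    simp [PySem.Dict.keys, PySem.Dict.size]
  omega

lemma pv_findLoop_ok : ∀ (fuel : Nat) (p : PySem.Dict Int Int) (a : Int),
    PvWF (pvGet p) → (∃ n, n ≤ fuel ∧ PvFix (pvGet p) ((pvGet p)^[n] a)) →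
    PvIsRoot (pvGet p) a (pvFindLoop fuel p a).1 ∧
    (∀ x b, PvIsRoot (pvGet (pvFindLoop fuel p a).2) x b ↔ PvIsRoot (pvGet p) x b) := by
  intro fuel
  induction fuel with
  | zero =>
    intro p a wf hex
    obtain ⟨n, hn, hfix⟩ := hex
    have hn0 : n = 0 := by omega
    subst hn0
    simp only [Function.iterate_zero, id_eq] at hfix
    exact ⟨⟨⟨0, rfl⟩, hfix⟩, fun x b => Iff.rfl⟩
  | succ fuel ih =>
    intro p a wf hex
    by_cases hfa : pvGet p a = a
    · rw [show pvFindLoop (fuel + 1) p a = (a, p) from by simp [pvFindLoop, hfa]]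
      exact ⟨⟨⟨0, rfl⟩, hfa⟩, fun x b => Iff.rfl⟩
    · set g := pvGet p with hgdef
      set p' := p.insert a (g (g a)) with hp'
      have hred : pvFindLoop (fuel + 1) p a = pvFindLoop fuel p' (pvGet p' a) := by
        simp only [pvFindLoop]
        rw [if_neg hfa]
      have hup : pvGet p' = Function.update g a (g (g a)) := pv_pvGet_insert p a (g (g a))
      have ha' : pvGet p' a = g (g a) := by rw [hup]; exact Function.update_self a (g (g a)) g
      have wf' : PvWF (pvGet p') := by rw [hup]; exact pv_wf_halve wf hfa
      have hne : ∀ j, j ≠ 0 → g^[j] a ≠ a := by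
        intro j hj hcon
        exact hfa (pv_wf_period wf hj hcon)
      -- transfer the fuel bound
      have hexd : ∃ n, PvFix g (g^[n] a) := by obtain ⟨n, _, h⟩ := hex; exact ⟨n, h⟩
      have hdec : DecidablePred (fun n => PvFix g (g^[n] a)) := fun n => by unfold PvFix; infer_instance
      set d := Nat.find hexd with hd
      have hdle : d ≤ fuel + 1 := by
        obtain ⟨n, hn, hfix⟩ := hex
        exact le_trans (Nat.find_min' hexd hfix) hn
      have hd0 : d ≠ 0 := by
        intro h0
        have hsp := Nat.find_spec hexd
        rw [← hd, h0] at hsp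
        simp only [Function.iterate_zero, id_eq] at hsp
        exact hfa hsp
      have hex' : ∃ m, m ≤ fuel ∧ PvFix (pvGet p') ((pvGet p')^[m] (pvGet p' a)) := by
        by_cases hd1 : d = 1
        · -- g a is a fixpoint, and then g (g a) = g a
          have hfix1 : PvFix g (g a) := by
            have hsp := Nat.find_spec hexd
            rw [← hd, hd1] at hsp
            simpa using hsp
          refine ⟨0, Nat.zero_le _, ?_⟩
          simp only [Function.iterate_zero, id_eq, ha']
          have : g (g a) = g a := hfix1
          rw [hup]
          unfold PvFix
          rw [this, Function.update_of_ne (fun h => hne 1 one_ne_zero (by simpa using h)) , hfix1]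
        · -- d ≥ 2
          have hd2 : 2 ≤ d := by omega
          have aux : ∀ k, (pvGet p')^[k] (g (g a)) = g^[k + 2] a := by
            intro k
            induction k with
            | zero =>
              have h2 : g^[0 + 2] a = g (g a) := by
                rw [Function.iterate_succ_apply', Function.iterate_one]
              simp only [Function.iterate_zero, id_eq]
              exact h2.symm
            | succ k ihk =>
              rw [Function.iterate_succ_apply', ihk, hup]
              rw [Function.update_of_ne (hne (k + 2) (by omega))]
              exact (Function.iterate_succ_apply' g (k + 2) a).symm
          refine ⟨d - 2, by omega, ?_⟩
          rw [ha', aux (d - 2)]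
          have hfixd : PvFix g (g^[d] a) := by have hsp := Nat.find_spec hexd; rw [← hd] at hsp; exact hsp
          have heq : d - 2 + 2 = d := by omega
          rw [heq, hup]
          unfold PvFix
          rw [Function.update_of_ne (hne d hd0), hfixd]
      obtain ⟨hroot', hpres'⟩ := ih p' (pvGet p' a) wf' hex'
      have hhalve : ∀ x b, PvIsRoot (pvGet p') x b ↔ PvIsRoot g x b := by
        intro x b; rw [hup]; exact pv_halve_root wf hfa x b
      constructor
      · rw [hred, ha']
        have h1 : PvIsRoot g (pvGet p' a) (pvFindLoop fuel p' (pvGet p' a)).1 :=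
          (hhalve _ _).mp hroot'
        rw [ha'] at h1
        exact pv_root_of_step (pv_root_of_step h1)
      · intro x b
        rw [hred]
        exact (hpres' x b).trans (hhalve x b)

lemma pv_find_ok (p : PySem.Dict Int Int) (a : Int) (wf : PvWF (pvGet p)) :
    PvIsRoot (pvGet p) a (pvFind p a).1 ∧
    (∀ x b, PvIsRoot (pvGet (pvFind p a).2) x b ↔ PvIsRoot (pvGet p) x b) := by
  unfold pvFind
  by_cases hc : p.contains a
  · simp only [hc, if_true]
    have hdep := pv_depth_le p a wf
    obtain ⟨n, hn, hfix⟩ := hdep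
    exact pv_findLoop_ok (p.size + 1) p a wf ⟨n, by omega, hfix⟩
  · simp only [hc, if_false, Bool.false_eq_true]
    have hcf : p.contains a = false := by simpa using hc
    have hsame : pvGet (p.insert a a) = pvGet p := pv_pvGet_ensure p a hcf
    have wf2 : PvWF (pvGet (p.insert a a)) := by rw [hsame]; exact wf
    have hdep := pv_depth_le (p.insert a a) a wf2
    obtain ⟨n, hn, hfix⟩ := hdep
    have := pv_findLoop_ok ((p.insert a a).size + 1) (p.insert a a) a wf2 ⟨n, by omega, hfix⟩
    rw [hsame] at this
    exact this

lemma pv_same_of_rootpres {g g' : Int → Int}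
    (h : ∀ x b, PvIsRoot g' x b ↔ PvIsRoot g x b) (x y : Int) :
    PvSame g' x y ↔ PvSame g x y := by
  unfold PvSame
  constructor
  · rintro ⟨b, hx, hy⟩; exact ⟨b, (h x b).mp hx, (h y b).mp hy⟩
  · rintro ⟨b, hx, hy⟩; exact ⟨b, (h x b).mpr hx, (h y b).mpr hy⟩

lemma pv_wf_of_rootpres {g g' : Int → Int} (wf : PvWF g)
    (h : ∀ x b, PvIsRoot g' x b ↔ PvIsRoot g x b) : PvWF g' := by
  intro x
  obtain ⟨b, hb⟩ := wf x
  exact ⟨b, (h x b).mpr hb⟩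

lemma pv_root_iff_same {g : Int → Int} {s rs : Int} (hs : PvIsRoot g s rs) (x : Int) :
    PvIsRoot g x rs ↔ PvSame g x s := by
  constructor
  · intro h; exact ⟨rs, h, hs⟩
  · rintro ⟨b, hx, hs'⟩
    rw [pv_root_unique hs hs']; exact hx

set_option maxHeartbeats 1000000 in
lemma pv_union_ok (p rank : PySem.Dict Int Int) (s e : Int) (wf : PvWF (pvGet p)) :
    ((pvUnion p rank s e).1 = true ↔ PvSame (pvGet p) s e) ∧
    PvWF (pvGet (pvUnion p rank s e).2.1) ∧
    (if (pvUnion p rank s e).1 then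
      ∀ x y, PvSame (pvGet (pvUnion p rank s e).2.1) x y ↔ PvSame (pvGet p) x y
     else
      ∀ x y, PvSame (pvGet (pvUnion p rank s e).2.1) x y ↔
        (PvSame (pvGet p) x y ∨
          ((PvSame (pvGet p) x s ∨ PvSame (pvGet p) x e) ∧
           (PvSame (pvGet p) y s ∨ PvSame (pvGet p) y e)))) := by
  have hA := pv_find_ok p s wf
  have wf1 : PvWF (pvGet (pvFind p s).2) := pv_wf_of_rootpres wf hA.2
  have hB := pv_find_ok (pvFind p s).2 e wf1
  have wf2 : PvWF (pvGet (pvFind (pvFind p s).2 e).2) := pv_wf_of_rootpres wf1 hB.2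
  have hrootA : PvIsRoot (pvGet p) s (pvFind p s).1 := hA.1
  have hrootB0 : PvIsRoot (pvGet p) e (pvFind (pvFind p s).2 e).1 := (hA.2 _ _).mp hB.1
  have hpres2 : ∀ x b, PvIsRoot (pvGet (pvFind (pvFind p s).2 e).2) x b ↔ PvIsRoot (pvGet p) x b :=
    fun x b => (hB.2 x b).trans (hA.2 x b)
  set pa := (pvFind p s).1 with hpa
  set pb := (pvFind (pvFind p s).2 e).1 with hpb
  set p2 := (pvFind (pvFind p s).2 e).2 with hp2
  have hfixa : PvFix (pvGet p2) pa := ((hpres2 pa pa).mpr ⟨⟨0, rfl⟩, hrootA.2⟩).2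
  have hfixb : PvFix (pvGet p2) pb := ((hpres2 pb pb).mpr ⟨⟨0, rfl⟩, hrootB0.2⟩).2
  have hsame_iff : pa = pb ↔ PvSame (pvGet p) s e := by
    constructor
    · intro h; exact ⟨pa, hrootA, h ▸ hrootB0⟩
    · rintro ⟨b, hs, he⟩
      rw [pv_root_unique hrootA hs, pv_root_unique hrootB0 he]
  have hrootx_s : ∀ x, PvIsRoot (pvGet p2) x pa ↔ PvSame (pvGet p) x s := by
    intro x
    rw [hpres2 x pa]
    exact pv_root_iff_same hrootA x
  have hrootx_e : ∀ x, PvIsRoot (pvGet p2) x pb ↔ PvSame (pvGet p) x e := by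
    intro x
    rw [hpres2 x pb]
    exact pv_root_iff_same hrootB0 x
  have hmerge : ∀ (q : PySem.Dict Int Int), pa ≠ pb →
      (q = p2.insert pb pa ∨ q = p2.insert pa pb) →
      PvWF (pvGet q) ∧
      (∀ x y, PvSame (pvGet q) x y ↔
        (PvSame (pvGet p) x y ∨
          ((PvSame (pvGet p) x s ∨ PvSame (pvGet p) x e) ∧
           (PvSame (pvGet p) y s ∨ PvSame (pvGet p) y e)))) := by
    intro q hne hq
    rcases hq with hq | hq <;> subst hq <;> rw [pv_pvGet_insert]
    · refine ⟨pv_wf_link wf2 hfixb hfixa (Ne.symm hne), fun x y => ?_⟩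
      rw [pv_link_same hfixb hfixa (Ne.symm hne)]
      rw [pv_same_of_rootpres hpres2, hrootx_s x, hrootx_e x, hrootx_s y, hrootx_e y]
      tauto
    · refine ⟨pv_wf_link wf2 hfixa hfixb hne, fun x y => ?_⟩
      rw [pv_link_same hfixa hfixb hne]
      rw [pv_same_of_rootpres hpres2, hrootx_s x, hrootx_e x, hrootx_s y, hrootx_e y]
  by_cases heq : pa = pb
  · have hU : pvUnion p rank s e =
        (true, p2, ((rank.insert pa (rank.getD pa 0)).insert pb
          ((rank.insert pa (rank.getD pa 0)).getD pb 0))) := by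
      simp only [pvUnion, ← hpa, ← hpb, ← hp2, if_pos heq]
    rw [hU]
    refine ⟨by simpa using (hsame_iff.mp heq), wf2, ?_⟩
    simp only [if_true]
    intro x y
    exact pv_same_of_rootpres hpres2 x y
  · have hU : (pvUnion p rank s e).1 = false ∧
        ((pvUnion p rank s e).2.1 = p2.insert pb pa ∨ (pvUnion p rank s e).2.1 = p2.insert pa pb) := by
      simp only [pvUnion, ← hpa, ← hpb, ← hp2, if_neg heq]
      split_ifs <;> simp
    obtain ⟨h1, h2⟩ := hU
    obtain ⟨hwf, hiff⟩ := hmerge _ heq h2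
    rw [h1]
    refine ⟨by simpa using (fun h => heq (hsame_iff.mpr h)), hwf, ?_⟩
    simp only [Bool.false_eq_true, if_false]
    exact hiff

def pvRep (c : PySem.Dict Int Int) (x : Int) : Int := c.getD x x

def PvClosed (c : PySem.Dict Int Int) : Prop := ∀ x v, c.get? x = some v → c.get? v = some v

lemma pv_rep_insert2 (c : PySem.Dict Int Int) (s e x : Int) :
    pvRep ((c.insert s (pvRep c s)).insert e (pvRep c e)) x = pvRep c x := by
  unfold pvRep
  rw [PySem.Dict.getD_insert, PySem.Dict.getD_insert]
  by_cases h1 : x = e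
  · subst h1; simp
  · rw [if_neg h1]
    by_cases h2 : x = s
    · subst h2; simp
    · rw [if_neg h2]

lemma pv_get?_mapVals (f : Int → Int) (l : List (Int × Int)) (x : Int) :
    (PySem.Dict.mk (l.map (fun q => (q.1, f q.2)))).get? x = ((PySem.Dict.mk l).get? x).map f := by
  induction l with
  | nil => rfl
  | cons hd tl ih =>
    rw [List.map_cons, PySem.Dict.get?_mk_cons, PySem.Dict.get?_mk_cons]
    by_cases h : hd.1 == x
    · rw [if_pos h, if_pos h]; rfl
    · rw [if_neg h, if_neg h]; exact ih

lemma pv_get?_mapVals_dict (f : Int → Int) (c : PySem.Dict Int Int) (x : Int) :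
    (PySem.Dict.mk (c.items.map (fun q => (q.1, f q.2)))).get? x = (c.get? x).map f := by
  cases c with
  | mk items => exact pv_get?_mapVals f items x

lemma pv_rep_mapVals (c : PySem.Dict Int Int) (le ls x : Int) (hle : c.get? le = some le) :
    pvRep (PySem.Dict.mk (c.items.map (fun q => (q.1, if q.2 = le then ls else q.2)))) x
      = (if pvRep c x = le then ls else pvRep c x) := by
  unfold pvRep
  rw [PySem.Dict.getD_eq_get?_getD, PySem.Dict.getD_eq_get?_getD,
    pv_get?_mapVals_dict (fun v => if v = le then ls else v) c x]
  cases h : c.get? x with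
  | none =>
    have hxle : x ≠ le := by intro hx; rw [hx, hle] at h; simp at h
    simp [hxle]
  | some v => simp

lemma pv_closed_mapVals {c : PySem.Dict Int Int} {ls le : Int} (hc : PvClosed c)
    (hls : c.get? ls = some ls) (hne : ls ≠ le) :
    PvClosed (PySem.Dict.mk (c.items.map (fun q => (q.1, if q.2 = le then ls else q.2)))) := by
  intro x v h
  rw [pv_get?_mapVals_dict (fun v => if v = le then ls else v) c x] at h
  rw [pv_get?_mapVals_dict (fun v => if v = le then ls else v) c v]
  cases hx : c.get? x with
  | none => rw [hx] at h; simp at h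
  | some w =>
    rw [hx] at h
    simp only [Option.map_some] at h
    by_cases hw : w = le
    · rw [if_pos hw] at h
      have hv : v = ls := by injection h with h; omega
      subst hv
      rw [hls]
      simp [hne]
    · rw [if_neg hw] at h
      have hv : v = w := by injection h with h; omega
      subst hv
      rw [hc x v hx]
      simp [hw]

lemma pv_f_collapse {ls le : Int} (_hne : ls ≠ le) (u v : Int) :
    ((if u = le then ls else u) = (if v = le then ls else v)) ↔
      (u = v ∨ ((u = ls ∨ u = le) ∧ (v = ls ∨ v = le))) := by
  split_ifs <;> constructor <;> intro h <;> omega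

lemma pv_frep (c : PySem.Dict Int Int) (y w : Int) (h : c.get? y = some w) : pvRep c y = w := by
  unfold pvRep
  rw [PySem.Dict.getD_eq_get?_getD, h]
  rfl

lemma pv_closed_insert2 {c : PySem.Dict Int Int} (hc : PvClosed c) (s e : Int) :
    PvClosed ((c.insert s (pvRep c s)).insert e (pvRep c e)) := by
  set ls := pvRep c s with hls
  set le := pvRep c e with hle
  have hq : ∀ x, ((c.insert s ls).insert e le).get? x
      = if x = e then some le else if x = s then some ls else c.get? x := by
    intro x
    rw [PySem.Dict.get?_insert, PySem.Dict.get?_insert]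
  have f1 : c.get? ls = some ls ∨ (ls = s ∧ c.get? s = none) := by
    cases h : c.get? s with
    | none =>
      right
      exact ⟨by rw [hls]; exact PySem.Dict.getD_of_get?_eq_none c s h, rfl⟩
    | some w =>
      left
      have hw : ls = w := by rw [hls]; exact pv_frep c s w h
      rw [hw]; exact hc s w h
  have f2 : c.get? le = some le ∨ (le = e ∧ c.get? e = none) := by
    cases h : c.get? e with
    | none =>
      right
      exact ⟨by rw [hle]; exact PySem.Dict.getD_of_get?_eq_none c e h, rfl⟩
    | some w =>
      left
      have hw : le = w := by rw [hle]; exact pv_frep c e w h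
      rw [hw]; exact hc e w h
  have hB : ((c.insert s ls).insert e le).get? le = some le := by
    rw [hq le]
    by_cases h1 : le = e
    · rw [if_pos h1]
    · rw [if_neg h1]
      rcases f2 with hf | ⟨hfe, _⟩
      · by_cases h2 : le = s
        · rw [if_pos h2]
          have hf' : c.get? s = some le := by rw [← h2]; exact hf
          have : ls = le := by rw [hls]; exact pv_frep c s le hf'
          rw [this]
        · rw [if_neg h2]; exact hf
      · exact absurd hfe h1
  have hC : ((c.insert s ls).insert e le).get? ls = some ls := by
    rw [hq ls]
    by_cases h1 : ls = e
    · rw [if_pos h1]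
      rcases f1 with hf | ⟨hfs, _⟩
      · have hf' : c.get? e = some ls := by rw [← h1]; exact hf
        have : le = ls := by rw [hle]; exact pv_frep c e ls hf'
        rw [this]
      · have hes : e = s := by omega
        have : le = ls := by rw [hle, hes, hls]
        rw [this]
    · rw [if_neg h1]
      by_cases h2 : ls = s
      · rw [if_pos h2]
      · rw [if_neg h2]
        rcases f1 with hf | ⟨hfs, _⟩
        · exact hf
        · exact absurd hfs h2
  intro x v h
  rw [hq x] at h
  by_cases h1 : x = e
  · rw [if_pos h1] at h
    injection h with h
    rw [← h]; exact hB
  · rw [if_neg h1] at h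
    by_cases h2 : x = s
    · rw [if_pos h2] at h
      injection h with h
      rw [← h]; exact hC
    · rw [if_neg h2] at h
      have hv := hc x v h
      rw [hq v]
      by_cases h3 : v = e
      · rw [if_pos h3]
        have hv' : c.get? e = some v := by rw [← h3]; exact hv
        have : le = v := by rw [hle]; exact pv_frep c e v hv'
        rw [this]
      · rw [if_neg h3]
        by_cases h4 : v = s
        · rw [if_pos h4]
          have hv' : c.get? s = some v := by rw [← h4]; exact hv
          have : ls = v := by rw [hls]; exact pv_frep c s v hv'
          rw [this]
        · rw [if_neg h4]; exact hv

def PvInv (p c : PySem.Dict Int Int) : Prop :=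
  PvWF (pvGet p) ∧ PvClosed c ∧
    ∀ x y, PvSame (pvGet p) x y ↔ pvRep c x = pvRep c y

lemma pv_step_ok (p rank c : PySem.Dict Int Int) (resA resB : List Int)
    (hInv : PvInv p c) (hres : resA = resB) (s e : Int) :
    PvInv (pvStepA (p, rank, resA) [s, e]).1 (pvStepB (c, resB) [s, e]).1 ∧
    (pvStepA (p, rank, resA) [s, e]).2.2 = (pvStepB (c, resB) [s, e]).2 := by
  obtain ⟨wf, hcl, hiff⟩ := hInv
  have hu := pv_union_ok p rank s e wf
  have hdet : (pvUnion p rank s e).1 = true ↔ pvRep c s = pvRep c e :=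
    hu.1.trans (hiff s e)
  -- B-side common facts
  have hrep1 : ∀ x, pvRep ((c.insert s (pvRep c s)).insert e (pvRep c e)) x = pvRep c x :=
    pv_rep_insert2 c s e
  have hcl1 : PvClosed ((c.insert s (pvRep c s)).insert e (pvRep c e)) :=
    pv_closed_insert2 hcl s e
  have hstB : pvStepB (c, resB) [s, e] =
      (let ls := c.getD s s
       let le := c.getD e e
       let c1 := (c.insert s ls).insert e le
       if ls = le then (c1, [s, e])
       else (PySem.Dict.mk (c1.items.map (fun q => (q.1, if q.2 = le then ls else q.2))), resB)) := rfl
  rw [show (c.getD s s) = pvRep c s from rfl, show (c.getD e e) = pvRep c e from rfl] at hstB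
  have hstA : pvStepA (p, rank, resA) [s, e] =
      ((pvUnion p rank s e).2.1, (pvUnion p rank s e).2.2,
        if (pvUnion p rank s e).1 then [s, e] else resA) := rfl
  by_cases hls : pvRep c s = pvRep c e
  · -- cycle detected on both sides
    have hcyc : (pvUnion p rank s e).1 = true := hdet.mpr hls
    rw [hstA, hstB]
    simp only [hcyc, if_true]
    have hifftrue := hu.2.2
    rw [hcyc] at hifftrue
    simp only [if_true] at hifftrue
    refine ⟨⟨hu.2.1, ?_, ?_⟩, ?_⟩
    · show PvClosed (pvStepB (c, resB) [s, e]).1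
      rw [hstB]
      simp only []
      rw [if_pos hls]
      exact hcl1
    · show ∀ x y, _ ↔ pvRep (pvStepB (c, resB) [s, e]).1 x = pvRep (pvStepB (c, resB) [s, e]).1 y
      rw [hstB]
      simp only []
      rw [if_pos hls]
      intro x y
      rw [hrep1 x, hrep1 y]
      exact (hifftrue x y).trans (hiff x y)
    · show [s, e] = (pvStepB (c, resB) [s, e]).2
      rw [hstB]
      simp only []
      rw [if_pos hls]
  · -- merge on both sides
    have hcyc : (pvUnion p rank s e).1 = false := by
      cases h : (pvUnion p rank s e).1
      · rfl
      · exact absurd (hdet.mp h) hls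
    have hifffalse := hu.2.2
    rw [hcyc] at hifffalse
    simp only [Bool.false_eq_true, if_false] at hifffalse
    -- c1 facts
    set ls := pvRep c s with hlsd
    set le := pvRep c e with hled
    set c1 := (c.insert s ls).insert e le with hc1d
    have hse : s ≠ e := by
      intro h; exact hls (by rw [hlsd, hled, h])
    have he1 : c1.get? e = some le := PySem.Dict.get?_insert_self _ e le
    have hs1 : c1.get? s = some ls := by
      rw [hc1d, PySem.Dict.get?_insert, if_neg hse, PySem.Dict.get?_insert_self]
    have hle1 : c1.get? le = some le := hcl1 e le he1
    have hls1 : c1.get? ls = some ls := hcl1 s ls hs1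
    have hrep2 : ∀ x, pvRep (PySem.Dict.mk (c1.items.map (fun q => (q.1, if q.2 = le then ls else q.2)))) x
        = (if pvRep c x = le then ls else pvRep c x) := by
      intro x
      rw [pv_rep_mapVals c1 le ls x hle1, hrep1 x]
    refine ⟨⟨?_, ?_, ?_⟩, ?_⟩
    · rw [hstA]; exact hu.2.1
    · show PvClosed (pvStepB (c, resB) [s, e]).1
      rw [hstB]
      simp only []
      rw [if_neg hls]
      exact pv_closed_mapVals hcl1 hls1 hls
    · show ∀ x y, PvSame (pvGet (pvStepA (p, rank, resA) [s, e]).1) x y ↔ _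
      rw [hstA, hstB]
      simp only []
      rw [if_neg hls]
      intro x y
      rw [hrep2 x, hrep2 y, pv_f_collapse hls]
      rw [hifffalse x y, hiff x y, hiff x s, hiff x e, hiff y s, hiff y e]
    · show (if (pvUnion p rank s e).1 then [s, e] else resA) = _
      rw [hstB]
      simp only []
      rw [if_neg hls, hcyc]
      simpa using hres

lemma pv_inv_init : PvInv PySem.Dict.empty PySem.Dict.empty := by
  have hid : pvGet (PySem.Dict.empty : PySem.Dict Int Int) = id := by
    funext x
    unfold pvGet
    exact PySem.Dict.getD_empty x x
  have hroot : ∀ x b : Int, PvIsRoot (pvGet (PySem.Dict.empty : PySem.Dict Int Int)) x b ↔ x = b := by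
    intro x b
    rw [hid]
    constructor
    · rintro ⟨⟨n, hn⟩, _⟩
      rw [Function.iterate_id] at hn
      exact hn
    · rintro rfl
      exact ⟨⟨0, rfl⟩, rfl⟩
  refine ⟨?_, ?_, ?_⟩
  · intro x; exact ⟨x, (hroot x x).mpr rfl⟩
  · intro x v h
    rw [PySem.Dict.get?_empty] at h
    simp at h
  · intro x y
    unfold PvSame
    constructor
    · rintro ⟨b, hx, hy⟩
      rw [(hroot x b).mp hx, (hroot y b).mp hy]
    · intro h
      have hx : pvRep (PySem.Dict.empty : PySem.Dict Int Int) x = x := PySem.Dict.getD_empty x x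
      have hy : pvRep (PySem.Dict.empty : PySem.Dict Int Int) y = y := PySem.Dict.getD_empty y y
      rw [hx, hy] at h
      exact ⟨y, (hroot x y).mpr h, (hroot y y).mpr rfl⟩

lemma pv_fold_ok : ∀ (edges : List (List Int)), (∀ r ∈ edges, r.length = 2) →
    ∀ (p rank c : PySem.Dict Int Int) (resA resB : List Int), PvInv p c → resA = resB →
    (edges.foldl pvStepA (p, rank, resA)).2.2 = (edges.foldl pvStepB (c, resB)).2 := by
  intro edges
  induction edges with
  | nil =>
    intro _ p rank c resA resB _ hres
    simpa using hres
  | cons r tl ih =>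
    intro h2 p rank c resA resB hInv hres
    have hr : r.length = 2 := h2 r (List.mem_cons_self)
    match r, hr with
    | [s, e], _ =>
      rw [List.foldl_cons, List.foldl_cons]
      have hstep := pv_step_ok p rank c resA resB hInv hres s e
      have hA : pvStepA (p, rank, resA) [s, e] =
          ((pvStepA (p, rank, resA) [s, e]).1, (pvStepA (p, rank, resA) [s, e]).2.1,
            (pvStepA (p, rank, resA) [s, e]).2.2) := rfl
      have hB : pvStepB (c, resB) [s, e] =
          ((pvStepB (c, resB) [s, e]).1, (pvStepB (c, resB) [s, e]).2) := rfl
      rw [hA, hB]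
      exact ih (fun r hm => h2 r (List.mem_cons_of_mem _ hm)) _ _ _ _ _ hstep.1 hstep.2

-- ===== VERDICT (by name: the statement is the Claim_ definition above) =====
theorem doit_disjoint_spec : Claim_equal_doit_disjoint := by
  intro edges _ hpre
  unfold Spec_doit_disjoint doit_disjoint doit_disjoint_alt
  exact pv_fold_ok edges hpre _ _ _ _ _ pv_inv_init rfl
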